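-- pv_equiv track=rewrite | github.com/shukku11/ai_exercises | prompt_engineering/few_shot_demo.py | select_support_examples
-- ===== SOURCE A (Python) =====
-- def select_support_examples(
--     tickets: list[dict[str, str]], per_label: int = 1
-- ) -> list[dict[str, str]]:
--     selected: list[dict[str, str]] = []
--     counts: dict[str, int] = {}
--
--     for ticket in tickets:
--         label = ticket["label"]
--         current = counts.get(label, 0)
--         if current < per_label:
--             selected.append(ticket)
--             counts[label] = current + 1
--
--     return selected
-- ===== SOURCE B (Python) =====
-- def select_support_examples(
--     tickets: list[dict[str, str]], per_label: int = 1
-- ) -> list[dict[str, str]]: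
--     groups: dict[str, list[int]] = {}
--     for i, ticket in enumerate(tickets):
--         groups.setdefault(ticket["label"], []).append(i)
--
--     k = max(per_label, 0)
--     keep: set[int] = set()
--     for idxs in groups.values():
--         keep.update(idxs[:k])
--
--     return [ticket for i, ticket in enumerate(tickets) if i in keep]
-- ===== Notes on version B (the rewrite author's own statement) =====
-- stated objective: alternative
-- what changed: Replaces the stateful counting pass (running per-label counter deciding each ticket as it is seen) by a grouping decomposition: one pass builds a label -> occurrence-indices table, the first per_label indices of each group form a selected-index set, and a final pass over enumerate(tickets) keeps exactly those positions, preserving order.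
import Mathlib
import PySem

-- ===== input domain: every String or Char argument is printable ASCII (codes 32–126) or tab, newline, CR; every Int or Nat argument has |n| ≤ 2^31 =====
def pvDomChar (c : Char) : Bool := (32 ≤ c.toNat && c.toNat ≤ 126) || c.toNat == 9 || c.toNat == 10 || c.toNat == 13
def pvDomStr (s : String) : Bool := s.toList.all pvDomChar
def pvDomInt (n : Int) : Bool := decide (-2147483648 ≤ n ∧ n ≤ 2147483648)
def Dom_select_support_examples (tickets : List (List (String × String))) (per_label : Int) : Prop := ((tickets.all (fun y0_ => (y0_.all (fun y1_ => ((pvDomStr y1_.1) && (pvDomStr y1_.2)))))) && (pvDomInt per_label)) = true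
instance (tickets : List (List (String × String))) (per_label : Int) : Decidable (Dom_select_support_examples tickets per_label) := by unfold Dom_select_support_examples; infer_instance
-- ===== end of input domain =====

-- B replaces A's stateful per-label counter pass by a grouping decomposition (label → occurrence
-- indices, the first per_label indices of each group form a selected-index set, then an
-- order-preserving filter pass); alternative decomposition of the same task, same cost.

-- ===== PORT A =====
-- ticket["label"] (used by both Pythons): first-match lookup in the ticket dict; total form, exact under Pre_ (key present)
def pvLabel (ticket : List (String × String)) : String :=
  (PySem.Dict.mk ticket).getD "label" ""

def select_support_examples (tickets : List (List (String × String))) (per_label : Int) : List (List (String × String)) :=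
  (tickets.foldl
    (fun (st : List (List (String × String)) × PySem.Dict String Int) ticket =>
      let label := pvLabel ticket
      let current := st.2.getD label 0
      if current < per_label then (st.1 ++ [ticket], st.2.insert label (current + 1))
      else st)
    ([], PySem.Dict.empty)).1

-- ===== PORT B =====
-- groups.setdefault(lab, []).append(i) is exactly groups[lab] = groups.get(lab, []) + [i], i.e. Dict.modify
def select_support_examples_alt (tickets : List (List (String × String))) (per_label : Int) : List (List (String × String)) :=
  let groups : PySem.Dict String (List Int) :=
    (PySem.List.enumerate tickets 0).foldl
      (fun g p => g.modify (pvLabel p.2) [] (fun l => l ++ [p.1]))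
      PySem.Dict.empty
  let k : Int := max per_label 0
  let keep : PySem.Set Int :=
    groups.values.foldl
      (fun s idxs => PySem.Set.update s (PySem.List.slice idxs none (some k)))
      PySem.Set.empty
  (PySem.List.enumerate tickets 0).filterMap
    (fun p => if PySem.Set.contains keep p.1 then some p.2 else none)

-- ===== PRECONDITION & SPEC =====
-- Pre_: every ticket has a "label" key — exactly the inputs where Python A's ticket["label"] does not raise KeyError
def Pre_select_support_examples (tickets : List (List (String × String))) (per_label : Int) : Prop :=
  ∀ t ∈ tickets, (PySem.Dict.mk t).contains "label" = true
instance (tickets : List (List (String × String))) (per_label : Int) : Decidable (Pre_select_support_examples tickets per_label) := by unfold Pre_select_support_examples; infer_instance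

def pvWitness_select_support_examples : (List (List (String × String))) × Int :=
  ([[("label", "billing"), ("text", "refund")], [("label", "tech")], [("label", "billing")]], 1)

def Spec_select_support_examples (tickets : List (List (String × String))) (per_label : Int) (out : List (List (String × String))) : Prop := out = select_support_examples_alt tickets per_label
instance (tickets : List (List (String × String))) (per_label : Int) (out : List (List (String × String))) : Decidable (Spec_select_support_examples tickets per_label out) := by unfold Spec_select_support_examples; infer_instance

-- ===== CLAIM (what is proved, stated in full; the proofs are below) =====
def Claim_equal_select_support_examples : Prop := ∀ (tickets : List (List (String × String))) (per_label : Int), Dom_select_support_examples tickets per_label → Pre_select_support_examples tickets per_label → Spec_select_support_examples tickets per_label (select_support_examples tickets per_label)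

-- ===== LEMMAS AND PROOFS =====

-- number of tickets with a given label
def pvCnt (l : List (List (String × String))) (lab : String) : Nat :=
  l.countP (fun u => pvLabel u == lab)

-- common normal form: keep t exactly when fewer than per_label same-label tickets precede it
def pvSelRec (per_label : Int) (pre rest : List (List (String × String))) : List (List (String × String)) :=
  match rest with
  | [] => []
  | t :: rs =>
    if (pvCnt pre (pvLabel t) : Int) < per_label then t :: pvSelRec per_label (pre ++ [t]) rs
    else pvSelRec per_label (pre ++ [t]) rs

-- the (enumerate) indices at which label lab occurs
def pvIdxs (tickets : List (List (String × String))) (lab : String) : List Int :=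
  ((PySem.List.enumerate tickets 0).filter (fun p => pvLabel p.2 == lab)).map (·.1)

-- B's two lets as standalone defs (proof helpers; definitionally B's groups/keep)
def pvGroups (tickets : List (List (String × String))) : PySem.Dict String (List Int) :=
  (PySem.List.enumerate tickets 0).foldl
    (fun g p => g.modify (pvLabel p.2) [] (fun l => l ++ [p.1]))
    PySem.Dict.empty

def pvKeep (tickets : List (List (String × String))) (per_label : Int) : PySem.Set Int :=
  (pvGroups tickets).values.foldl
    (fun s idxs => PySem.Set.update s (PySem.List.slice idxs none (some (max per_label 0))))
    PySem.Set.empty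

lemma pvCnt_append_singleton (pre : List (List (String × String))) (t : List (String × String)) (lab : String) :
    pvCnt (pre ++ [t]) lab = pvCnt pre lab + (if pvLabel t == lab then 1 else 0) := by
  simp [pvCnt, List.countP_append, List.countP_cons]

-- A-side loop invariant: the counter holds min(#occurrences so far, max(per_label, 0))
lemma lemA (per_label : Int) : ∀ (rest pre sel : List (List (String × String))) (counts : PySem.Dict String Int),
    (∀ lab, counts.getD lab 0 = min (pvCnt pre lab : Int) (max per_label 0)) →
    ((rest.foldl
      (fun (st : List (List (String × String)) × PySem.Dict String Int) ticket =>
        let label := pvLabel ticket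
        let current := st.2.getD label 0
        if current < per_label then (st.1 ++ [ticket], st.2.insert label (current + 1))
        else st)
      (sel, counts)).1 = sel ++ pvSelRec per_label pre rest) := by
  intro rest
  induction rest with
  | nil => intro pre sel counts _; simp [pvSelRec]
  | cons t rs ih =>
    intro pre sel counts hinv
    simp only [List.foldl_cons]
    have hc := hinv (pvLabel t)
    by_cases hsel : (pvCnt pre (pvLabel t) : Int) < per_label
    · have hcond : counts.getD (pvLabel t) 0 < per_label := by omega
      simp only [hcond, if_pos]
      rw [ih (pre ++ [t]) (sel ++ [t]) _ ?_]
      · simp [pvSelRec, hsel]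
      · intro lab
        rw [PySem.Dict.getD_insert]
        rw [pvCnt_append_singleton]
        by_cases hl : lab = pvLabel t
        · subst hl
          simp only [beq_self_eq_true, if_pos]
          have := hinv (pvLabel t)
          push_cast
          omega
        · have : (pvLabel t == lab) = false := by simp [Ne.symm hl]
          simp only [if_neg hl, this, if_neg Bool.false_ne_true]
          rw [hinv lab]; simp
    · have hcond : ¬ counts.getD (pvLabel t) 0 < per_label := by omega
      simp only [if_neg hcond]
      rw [ih (pre ++ [t]) sel counts ?_]
      · simp [pvSelRec, hsel]
      · intro lab
        rw [pvCnt_append_singleton, hinv lab]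
        by_cases hl : pvLabel t = lab
        · subst hl; simp only [beq_self_eq_true, if_pos]
          have := hinv (pvLabel t)
          push_cast
          omega
        · have : (pvLabel t == lab) = false := by simp [hl]
          simp [this]

lemma A_char (tickets : List (List (String × String))) (per_label : Int) :
    select_support_examples tickets per_label = pvSelRec per_label [] tickets := by
  unfold select_support_examples
  rw [lemA per_label tickets [] [] PySem.Dict.empty ?_]
  · simp
  · intro lab
    simp [pvCnt]

lemma len_filter_enumerate (f : List (String × String) → Bool) :
    ∀ (xs : List (List (String × String))) (s : Int),
    ((PySem.List.enumerate xs s).filter (fun p => f p.2)).length = xs.countP f := by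
  intro xs
  induction xs with
  | nil => intro s; simp [PySem.List.enumerate_nil]
  | cons x xs ih =>
    intro s
    simp [PySem.List.enumerate_cons, List.filter_cons, List.countP_cons]
    cases hf : f x <;> simp [ih (s + 1)]

lemma mem_take_append_cons {i : Int} {L1 L2 : List Int} (h1 : i ∉ L1) (m : Nat) :
    i ∈ (L1 ++ i :: L2).take m ↔ L1.length < m := by
  rw [List.take_append]
  rcases Nat.lt_or_ge L1.length m with h | h
  · have : m - L1.length = (m - L1.length - 1) + 1 := by omega
    rw [this]; simp; omega
  · have : m - L1.length = 0 := by omega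
    rw [this]; simp
    constructor
    · intro hmem; exact absurd (List.take_subset _ _ hmem) h1
    · omega

lemma groups_getD_aux (lab : String) : ∀ (ps : List (Int × List (String × String))) (g : PySem.Dict String (List Int)),
    (ps.foldl (fun g p => g.modify (pvLabel p.2) [] (fun l => l ++ [p.1])) g).getD lab []
      = g.getD lab [] ++ (ps.filter (fun p => pvLabel p.2 == lab)).map (·.1) := by
  intro ps
  induction ps with
  | nil => simp
  | cons p ps ih =>
    intro g
    simp only [List.foldl_cons, List.filter_cons]
    rw [ih]
    by_cases hl : pvLabel p.2 = lab
    · subst hl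
      rw [PySem.Dict.getD_modify_self]
      simp
    · have hb : (pvLabel p.2 == lab) = false := by simp [hl]
      rw [PySem.Dict.getD_modify_of_ne]
      · simp [hb]
      · exact fun h => hl h.symm

lemma pvGroups_getD (tickets : List (List (String × String))) (lab : String) :
    (pvGroups tickets).getD lab [] = pvIdxs tickets lab := by
  unfold pvGroups pvIdxs
  rw [groups_getD_aux]
  simp

lemma pvGroups_keys (tickets : List (List (String × String))) :
    (pvGroups tickets).keys = PySem.Set.ofList ((PySem.List.enumerate tickets 0).map (fun p => pvLabel p.2)) := by
  unfold pvGroups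
  rw [PySem.Dict.keys_foldl_modify_key]
  simp [PySem.Set.update_nil_left]

lemma pvGroups_nodup (tickets : List (List (String × String))) :
    (pvGroups tickets).keys.Nodup := by
  unfold pvGroups
  exact PySem.Dict.nodup_keys_foldl_modify_key _ _ _ _ _ (by simp)

lemma mem_keep_fold (kk : Int) (i : Int) : ∀ (vs : List (List Int)) (s : PySem.Set Int),
    i ∈ vs.foldl (fun s idxs => PySem.Set.update s (PySem.List.slice idxs none (some kk))) s ↔
      i ∈ s ∨ ∃ v ∈ vs, i ∈ PySem.List.slice v none (some kk) := by
  intro vs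
  induction vs with
  | nil => simp
  | cons v vs ih =>
    intro s
    simp only [List.foldl_cons, ih, PySem.Set.mem_update]
    simp only [List.mem_cons]
    constructor
    · rintro (⟨h | h⟩ | ⟨w, hw, h⟩)
      · exact Or.inl h
      · exact Or.inr ⟨v, Or.inl rfl, h⟩
      · exact Or.inr ⟨w, Or.inr hw, h⟩
    · rintro (h | ⟨w, (rfl | hw), h⟩)
      · exact Or.inl (Or.inl h)
      · exact Or.inl (Or.inr h)
      · exact Or.inr ⟨w, hw, h⟩

-- position j is among the first m occurrence indices of its own label iff fewer than m same-label tickets precede it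
lemma mem_take_idxs (tickets : List (List (String × String))) (j : Nat) (hj : j < tickets.length) (m : Nat) :
    ((j : Int) ∈ (pvIdxs tickets (pvLabel tickets[j])).take m) ↔
      pvCnt (tickets.take j) (pvLabel tickets[j]) < m := by
  set lab := pvLabel tickets[j] with hlab
  have hsplit : tickets = tickets.take j ++ tickets[j] :: tickets.drop (j + 1) := by
    rw [List.getElem_cons_drop, List.take_append_drop]
  have hlen : (tickets.take j).length = j := by simp [List.length_take]; omega
  have hidxs : pvIdxs tickets lab
      = ((PySem.List.enumerate (tickets.take j) 0).filter (fun p => pvLabel p.2 == lab)).map (·.1)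
        ++ (j : Int) :: ((PySem.List.enumerate (tickets.drop (j + 1)) ((j : Int) + 1)).filter (fun p => pvLabel p.2 == lab)).map (·.1) := by
    conv_lhs => rw [pvIdxs, hsplit]
    rw [PySem.List.enumerate_append, PySem.List.enumerate_cons]
    rw [List.filter_append, List.filter_cons]
    simp only [hlen, zero_add]
    have : (pvLabel tickets[j] == lab) = true := by simp [hlab]
    simp [this]
  rw [hidxs]
  rw [mem_take_append_cons]
  · rw [List.length_map, len_filter_enumerate (fun u => pvLabel u == lab)]
    rfl
  · intro hmem
    simp only [List.mem_map] at hmem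
    obtain ⟨p, hp, hfst⟩ := hmem
    have := List.mem_filter.mp hp |>.1
    rw [PySem.List.mem_enumerate_iff] at this
    obtain ⟨k, hk, rfl⟩ := this
    simp only [zero_add] at hfst
    rw [hlen] at hk
    omega

lemma keep_char (tickets : List (List (String × String))) (per_label : Int) (j : Nat) (hj : j < tickets.length) :
    ((j : Int) ∈ pvKeep tickets per_label) ↔
      (pvCnt (tickets.take j) (pvLabel tickets[j]) : Int) < per_label := by
  have hm : max per_label 0 = (((max per_label 0).toNat : Nat) : Int) :=
    (Int.toNat_of_nonneg (le_max_right _ _)).symm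
  have hslice : ∀ v : List Int, PySem.List.slice v none (some (max per_label 0)) = v.take (max per_label 0).toNat := by
    intro v; rw [hm, PySem.List.slice_to_natCast]; simp
  have hiff : ((j : Int) ∈ pvKeep tickets per_label) ↔
      ∃ v ∈ (pvGroups tickets).values, (j : Int) ∈ v.take (max per_label 0).toNat := by
    rw [pvKeep, mem_keep_fold]
    simp only [hslice]
    simp [PySem.Set.empty]
  rw [hiff]
  have hvals : ∀ v, v ∈ (pvGroups tickets).values ↔
      ∃ lab ∈ (pvGroups tickets).keys, v = pvIdxs tickets lab := by
    intro v
    rw [PySem.Dict.values_eq_map_keys _ (pvGroups_nodup tickets) []]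
    simp only [List.mem_map]
    constructor
    · rintro ⟨lab, hk, h⟩; exact ⟨lab, hk, by rw [← h, pvGroups_getD]⟩
    · rintro ⟨lab, hk, rfl⟩; exact ⟨lab, hk, pvGroups_getD tickets lab⟩
  constructor
  · rintro ⟨v, hv, hmem⟩
    obtain ⟨lab, hk, rfl⟩ := (hvals v).mp hv
    have hmem' : (j : Int) ∈ pvIdxs tickets lab := List.mem_of_mem_take hmem
    obtain ⟨p, hp, hfst⟩ := List.mem_map.mp hmem'
    obtain ⟨hpe, hpl⟩ := List.mem_filter.mp hp
    rw [PySem.List.mem_enumerate_iff] at hpe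
    obtain ⟨k, hk', rfl⟩ := hpe
    simp only [zero_add] at hfst hpl
    have hkj : k = j := by exact_mod_cast hfst
    subst hkj
    have hlab : pvLabel tickets[k] = lab := eq_of_beq hpl
    rw [← hlab] at hmem
    rw [mem_take_idxs tickets k hk'] at hmem
    omega
  · intro hcnt
    refine ⟨pvIdxs tickets (pvLabel tickets[j]), ?_, ?_⟩
    · refine (hvals _).mpr ⟨pvLabel tickets[j], ?_, rfl⟩
      rw [pvGroups_keys]
      rw [PySem.Set.mem_ofList]
      refine List.mem_map.mpr ⟨((j : Int), tickets[j]), ?_, rfl⟩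
      rw [PySem.List.mem_enumerate_iff]
      exact ⟨j, hj, by simp⟩
    · rw [mem_take_idxs tickets j hj]
      omega

-- the filter pass, driven by any predicate agreeing with the prefix-count condition, is pvSelRec
lemma lemB (per_label : Int) (P : Int → Bool) : ∀ (rest pre : List (List (String × String))),
    (∀ (m : Nat) (hm : m < rest.length),
      P ((pre.length : Int) + m) = decide ((pvCnt (pre ++ rest.take m) (pvLabel rest[m]) : Int) < per_label)) →
    (PySem.List.enumerate rest (pre.length : Int)).filterMap
        (fun p => if P p.1 then some p.2 else none) = pvSelRec per_label pre rest := by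
  intro rest
  induction rest with
  | nil => intro pre _; simp [PySem.List.enumerate_nil, pvSelRec]
  | cons t rs ih =>
    intro pre h
    rw [PySem.List.enumerate_cons, List.filterMap_cons]
    have h0 := h 0 (by simp)
    simp only [List.take_zero, List.append_nil, List.getElem_cons_zero, Nat.cast_zero, add_zero] at h0
    have hrec : (PySem.List.enumerate rs ((pre.length : Int) + 1)).filterMap
        (fun p => if P p.1 then some p.2 else none) = pvSelRec per_label (pre ++ [t]) rs := by
      have hlen : ((pre ++ [t]).length : Int) = (pre.length : Int) + 1 := by
        simp
      rw [← hlen]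
      apply ih
      intro m hm
      have := h (m + 1) (by simpa using Nat.succ_lt_succ hm)
      simp only [List.take_succ_cons, List.getElem_cons_succ] at this
      rw [List.append_assoc]
      simp only [List.singleton_append]
      rw [show ((pre ++ [t]).length : Int) + (m : Int) = (pre.length : Int) + ((m + 1 : Nat) : Int) from by
        push_cast; ring_nf; simp [List.length_append]; ring]
      exact this
    by_cases hc : (pvCnt pre (pvLabel t) : Int) < per_label
    · simp only [h0, hc, decide_true, if_pos]
      rw [hrec]
      simp [pvSelRec, hc]
    · simp only [h0, hc, decide_false]
      rw [if_neg (by simp)]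
      rw [hrec]
      simp [pvSelRec, hc]

lemma B_char (tickets : List (List (String × String))) (per_label : Int) :
    select_support_examples_alt tickets per_label = pvSelRec per_label [] tickets := by
  have halt : select_support_examples_alt tickets per_label
      = (PySem.List.enumerate tickets 0).filterMap
          (fun p => if PySem.Set.contains (pvKeep tickets per_label) p.1 then some p.2 else none) := rfl
  rw [halt]
  have hmain := lemB per_label (fun i => PySem.Set.contains (pvKeep tickets per_label) i) tickets [] ?_
  · simpa using hmain
  · intro m hm
    simp only [List.length_nil, Nat.cast_zero, zero_add, List.nil_append]
    rw [Bool.eq_iff_iff]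
    simp only [PySem.Set.contains_iff, decide_eq_true_eq]
    exact keep_char tickets per_label m hm

-- ===== VERDICT (by name: the statement is the Claim_ definition above) =====
theorem select_support_examples_spec : Claim_equal_select_support_examples := by
  intro tickets per_label _ _
  unfold Spec_select_support_examples
  rw [A_char, B_char]
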